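-- pv_equiv track=rewrite | github.com/jcolinpatrick/kryptos | scripts/e_grille_03_transposition_attacks.py | route_cipher_diagonal
-- ===== SOURCE A (Python) =====
-- def route_cipher_diagonal(ct: str, nrows: int, ncols: int) -> str:
--     """Read CT into grid, extract via diagonal reads (top-right to bottom-left)."""
--     total = nrows * ncols
--     padded = ct + "X" * (total - len(ct)) if len(ct) < total else ct[:total]
--
--     grid = []
--     for r in range(nrows):
--         grid.append(list(padded[r*ncols:(r+1)*ncols]))
--
--     result = []
--     for d in range(nrows + ncols - 1):
--         for r in range(max(0, d - ncols + 1), min(nrows, d + 1)):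
--             c = d - r
--             if 0 <= c < ncols:
--                 result.append(grid[r][c])
--     return "".join(result)[:len(ct)]
-- ===== SOURCE B (Python) =====
-- def route_cipher_diagonal(ct: str, nrows: int, ncols: int) -> str:
--     """Read CT into grid, extract via diagonal reads (top-right to bottom-left)."""
--     if nrows <= 0 or ncols <= 0:
--         return ""
--     total = nrows * ncols
--     padded = ct + "X" * (total - len(ct)) if len(ct) < total else ct[:total]
--     buckets = [[] for _ in range(nrows + ncols - 1)]
--     for i, ch in enumerate(padded):
--         buckets[i // ncols + i % ncols].append(ch)
--     return "".join(ch for b in buckets for ch in b)[:len(ct)]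
-- ===== Notes on version B (the rewrite author's own statement) =====
-- stated objective: simpler
-- what changed: Replaces the explicit grid and the per-diagonal bounds arithmetic (nested loops over d and r) by a single linear pass that scatters each padded character into its anti-diagonal bucket (index i//ncols + i%ncols), then concatenates the buckets.
import Mathlib
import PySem

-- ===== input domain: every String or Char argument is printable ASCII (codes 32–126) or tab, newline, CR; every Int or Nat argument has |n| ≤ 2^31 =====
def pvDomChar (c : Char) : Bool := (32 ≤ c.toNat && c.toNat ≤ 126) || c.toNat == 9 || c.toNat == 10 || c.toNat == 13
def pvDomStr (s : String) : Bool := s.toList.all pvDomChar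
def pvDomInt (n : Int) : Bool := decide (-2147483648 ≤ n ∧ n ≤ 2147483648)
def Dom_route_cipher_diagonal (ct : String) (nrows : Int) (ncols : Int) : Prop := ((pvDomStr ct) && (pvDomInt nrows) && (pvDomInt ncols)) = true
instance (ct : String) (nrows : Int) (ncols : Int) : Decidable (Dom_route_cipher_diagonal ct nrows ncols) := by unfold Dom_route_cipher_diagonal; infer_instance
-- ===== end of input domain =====

-- B replaces A's grid and per-diagonal bounds loops by one linear pass scattering each
-- character into its anti-diagonal bucket and concatenating the buckets (simpler; same cost).


-- ===== PORT A =====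
def route_cipher_diagonal (ct : String) (nrows : Int) (ncols : Int) : String :=
  let cs := ct.toList
  let total := nrows * ncols
  let padded : List Char :=
    if (cs.length : Int) < total then
      cs ++ List.replicate (total - (cs.length : Int)).toNat 'X'
    else
      PySem.List.slice cs none (some total)
  let grid : List (List Char) :=
    (PySem.List.pyRange 0 nrows 1).foldl
      (fun g r => g ++ [PySem.List.slice padded (some (r * ncols)) (some ((r + 1) * ncols))]) []
  let result : List Char :=
    (PySem.List.pyRange 0 (nrows + ncols - 1) 1).foldl
      (fun res d =>
        (PySem.List.pyRange (max 0 (d - ncols + 1)) (min nrows (d + 1)) 1).foldl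
          (fun res r =>
            let c := d - r
            if 0 ≤ c ∧ c < ncols then
              -- grid[r][c]: the index is always in range when this branch runs
              -- (the guard gives 0 ≤ c < ncols, the loop gives 0 ≤ r < nrows, rows have ncols chars)
              res ++ [PySem.List.pyGetD (PySem.List.pyGetD grid r []) c 'X']
            else res)
          res)
      []
  String.ofList (PySem.List.slice result none (some (cs.length : Int)))

-- ===== PORT B =====
def route_cipher_diagonal_alt (ct : String) (nrows : Int) (ncols : Int) : String :=
  if nrows ≤ 0 ∨ ncols ≤ 0 then "" else
  let cs := ct.toList
  let total := nrows * ncols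
  let padded : List Char :=
    if (cs.length : Int) < total then
      cs ++ List.replicate (total - (cs.length : Int)).toNat 'X'
    else
      PySem.List.slice cs none (some total)
  let buckets0 : List (List Char) := (PySem.List.pyRange 0 (nrows + ncols - 1) 1).map (fun _ => ([] : List Char))
  let buckets : List (List Char) :=
    -- 'for i, ch in enumerate(padded)': the enumerate loop carried as an index counter
    (padded.foldl
      (fun (st : Int × List (List Char)) ch =>
        let j := PySem.Int.floordiv st.1 ncols + PySem.Int.mod st.1 ncols
        -- buckets[j].append(ch): the bucket index is always in range (i // ncols + i % ncols ≤ nrows+ncols-2)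
        (st.1 + 1, PySem.List.pySetD st.2 j (PySem.List.pyGetD st.2 j [] ++ [ch])))
      (0, buckets0)).2
  String.ofList (PySem.List.slice (buckets.foldl (fun acc b => acc ++ b) []) none (some (cs.length : Int)))

-- ===== PRECONDITION & SPEC =====
def Spec_route_cipher_diagonal (ct : String) (nrows : Int) (ncols : Int) (out : String) : Prop := out = route_cipher_diagonal_alt ct nrows ncols
instance (ct : String) (nrows : Int) (ncols : Int) (out : String) : Decidable (Spec_route_cipher_diagonal ct nrows ncols out) := by unfold Spec_route_cipher_diagonal; infer_instance

-- ===== CLAIM (what is proved, stated in full; the proofs are below) =====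
def Claim_equal_route_cipher_diagonal : Prop := ∀ (ct : String) (nrows : Int) (ncols : Int), Dom_route_cipher_diagonal ct nrows ncols → Spec_route_cipher_diagonal ct nrows ncols (route_cipher_diagonal ct nrows ncols)

-- ===== LEMMAS AND PROOFS =====

-- common normal form: for an m×k grid read off anti-diagonal by anti-diagonal
def diagSpec (m k : Nat) (p : List Char) : List Char :=
  (List.range (m + k - 1)).flatMap (fun j =>
    (List.range' (j + 1 - k) (min (j + 1) m - (j + 1 - k))).map
      (fun r => p.getD (r * k + (j - r)) 'X'))

lemma pv_getD_take_drop (p : List Char) (a kk c : Nat) (d : Char) (hc : c < kk) :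
    ((p.drop a).take kk).getD c d = p.getD (a + c) d := by
  simp [List.getD, List.getElem?_drop, hc]

lemma pv_flatten_eq (ls : List (List Char)) :
    ls.flatten = (List.range ls.length).flatMap (fun j => ls.getD j []) := by
  induction ls with
  | nil => simp
  | cons h t ih =>
    rw [List.flatten_cons, List.length_cons, List.range_succ_eq_map, List.flatMap_cons,
      List.flatMap_map]
    simp [ih]

lemma pv_flatMap_range_if {α : Type} (f : Nat → α) (lo hi : Nat) : ∀ (m : Nat),
    (List.range m).flatMap (fun r => if lo ≤ r ∧ r < hi then [f r] else []) =
      (List.range' lo (min hi m - lo)).map f := by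
  intro m
  induction m with
  | zero => simp
  | succ n ih =>
    rw [List.range_succ, List.flatMap_append, ih]
    by_cases h : lo ≤ n ∧ n < hi
    · have h1 : min hi (n + 1) - lo = (min hi n - lo) + 1 := by omega
      have h3 : lo + (min hi n - lo) = n := by omega
      rw [h1, List.range'_1_concat, List.map_append, h3]
      simp [h]
    · have h1 : min hi (n + 1) - lo = min hi n - lo := by omega
      rw [h1]
      simp [h]

lemma pv_filter_range_eq (k r j : Nat) :
    (List.range k).filter (fun c => decide (r + c = j)) =
      if r ≤ j ∧ j < r + k then [j - r] else [] := by
  induction k with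
  | zero => rw [if_neg (by omega)]; simp
  | succ n ih =>
    rw [List.range_succ, List.filter_append, ih]
    by_cases h : r + n = j
    · have h1 : List.filter (fun c => decide (r + c = j)) [n] = [n] := by simp [h]
      rw [h1, if_neg (by omega), if_pos (by omega), List.nil_append]
      have : j - r = n := by omega
      rw [this]
    · have h1 : List.filter (fun c => decide (r + c = j)) [n] = [] := by simp [h]
      rw [h1, List.append_nil]
      by_cases h2 : r ≤ j ∧ j < r + n
      · rw [if_pos h2, if_pos (by omega)]
      · rw [if_neg h2, if_neg (by omega)]

lemma pv_range_mul (k : Nat) : ∀ m, List.range (m * k) =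
    (List.range m).flatMap (fun r => (List.range k).map (fun c => r * k + c)) := by
  intro m
  induction m with
  | zero => simp
  | succ n ih =>
    rw [Nat.succ_mul, List.range_add, ih, List.range_succ, List.flatMap_append]
    simp

lemma pv_scatter_len (key : Nat → Nat) (val : Nat → Char) : ∀ (l : List Nat) (bs : List (List Char)),
    (l.foldl (fun bs i => bs.set (key i) (bs.getD (key i) [] ++ [val i])) bs).length = bs.length := by
  intro l
  induction l with
  | nil => intro bs; rfl
  | cons i t ih => intro bs; rw [List.foldl_cons, ih]; simp

lemma pv_scatter (key : Nat → Nat) (val : Nat → Char) : ∀ (l : List Nat) (bs : List (List Char)),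
    (∀ i ∈ l, key i < bs.length) → ∀ j,
    (l.foldl (fun bs i => bs.set (key i) (bs.getD (key i) [] ++ [val i])) bs).getD j [] =
      bs.getD j [] ++ (l.filter (fun i => decide (key i = j))).map val := by
  intro l
  induction l with
  | nil => intro bs _ j; simp
  | cons i t ih =>
    intro bs hlt j
    have hki := hlt i (by simp)
    have hlen : (bs.set (key i) (bs.getD (key i) [] ++ [val i])).length = bs.length := by simp
    rw [List.foldl_cons, List.filter_cons,
      ih _ (by intro x hx; rw [hlen]; exact hlt x (List.mem_cons_of_mem _ hx)) j]
    by_cases h : key i = j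
    · subst h
      simp [List.getD, hki]
    · simp [List.getD, h]
def pvPadI (cs : List Char) (total : Int) : List Char :=
  if (cs.length : Int) < total then
    cs ++ List.replicate (total - (cs.length : Int)).toNat 'X'
  else PySem.List.slice cs none (some total)

def pvAgrid (nrows ncols : Int) (p : List Char) : List (List Char) :=
  (PySem.List.pyRange 0 nrows 1).foldl
    (fun g r => g ++ [PySem.List.slice p (some (r * ncols)) (some ((r + 1) * ncols))]) []

def pvAres (nrows ncols : Int) (grid : List (List Char)) : List Char :=
  (PySem.List.pyRange 0 (nrows + ncols - 1) 1).foldl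
    (fun res d =>
      (PySem.List.pyRange (max 0 (d - ncols + 1)) (min nrows (d + 1)) 1).foldl
        (fun res r =>
          if 0 ≤ d - r ∧ d - r < ncols then
            res ++ [PySem.List.pyGetD (PySem.List.pyGetD grid r []) (d - r) 'X']
          else res)
        res)
    []

def pvBcore (m k : Nat) (p : List Char) : List Char :=
  ((p.foldl
      (fun (st : Int × List (List Char)) ch =>
        (st.1 + 1, PySem.List.pySetD st.2 (PySem.Int.floordiv st.1 (k : Int) + PySem.Int.mod st.1 (k : Int))
          (PySem.List.pyGetD st.2 (PySem.Int.floordiv st.1 (k : Int) + PySem.Int.mod st.1 (k : Int)) [] ++ [ch])))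
      (0, (PySem.List.pyRange 0 ((m : Int) + (k : Int) - 1) 1).map (fun _ => ([] : List Char)))).2).foldl
    (fun acc b => acc ++ b) []

lemma pv_padded_len (cs : List Char) (m k : Nat) : (pvPadI cs ((m : Int) * (k : Int))).length = m * k := by
  unfold pvPadI
  split
  next h => simp; omega
  next h => rw [PySem.List.slice_to cs (by positivity)]; simp; omega

lemma pv_A_norm (m k : Nat) (hm : 0 < m) (hk : 0 < k) (p : List Char) (_hp : p.length = m * k) :
    pvAres (m : Int) (k : Int) (pvAgrid (m : Int) (k : Int) p) = diagSpec m k p := by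
  have hgrid : pvAgrid (m : Int) (k : Int) p =
      (List.range m).map (fun r => (p.drop (r * k)).take k) := by
    unfold pvAgrid
    rw [PySem.List.foldl_append_singleton_eq_map
      (fun r => PySem.List.slice p (some (r * (k : Int))) (some ((r + 1) * (k : Int)))),
      List.nil_append, PySem.List.pyRange_zero_nat, List.map_map]
    apply List.map_congr_left
    intro r _
    show PySem.List.slice p (some ((r : Int) * (k : Int))) (some (((r : Int) + 1) * (k : Int))) =
      (p.drop (r * k)).take k
    have e1 : ((r : Int) * (k : Int)) = ((r * k : Nat) : Int) := by push_cast; ring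
    have e2 : (((r : Int) + 1) * (k : Int)) = (((r + 1) * k : Nat) : Int) := by push_cast; ring
    have e3 : (r + 1) * k - r * k = k := by rw [Nat.succ_mul]; omega
    rw [e1, e2, PySem.List.slice_natCast, e3]
  rw [hgrid]
  unfold pvAres
  have hD : ((m : Int) + (k : Int) - 1) = ((m + k - 1 : Nat) : Int) := by omega
  rw [hD, PySem.List.pyRange_zero_nat, List.foldl_map]
  have hstep : ∀ (res : List Char) (j : Nat),
      (PySem.List.pyRange (max 0 ((j : Int) - (k : Int) + 1)) (min (m : Int) ((j : Int) + 1)) 1).foldl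
        (fun res r =>
          if 0 ≤ (j : Int) - r ∧ (j : Int) - r < (k : Int) then
            res ++ [PySem.List.pyGetD
              (PySem.List.pyGetD ((List.range m).map (fun r => (p.drop (r * k)).take k)) r [])
              ((j : Int) - r) 'X']
          else res)
        res =
      res ++ (List.range' (j + 1 - k) (min (j + 1) m - (j + 1 - k))).map
        (fun r => p.getD (r * k + (j - r)) 'X') := by
    intro res j
    have hlo : max 0 ((j : Int) - (k : Int) + 1) = ((j + 1 - k : Nat) : Int) := by omega
    have hhi : min (m : Int) ((j : Int) + 1) = ((min (j + 1) m : Nat) : Int) := by omega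
    rw [hlo, hhi, PySem.List.pyRange_one]
    have hn2 : (((min (j + 1) m : Nat) : Int) - ((j + 1 - k : Nat) : Int)).toNat =
        min (j + 1) m - (j + 1 - k) := by omega
    rw [hn2, List.foldl_map]
    rw [PySem.List.foldl_congr_mem _ _
      (fun res t => res ++ [p.getD ((j + 1 - k + t) * k + (j - (j + 1 - k + t))) 'X']) res
      (by
        intro acc t ht
        have htn : t < min (j + 1) m - (j + 1 - k) := List.mem_range.mp ht
        have hrm : j + 1 - k + t < m := by omega
        have hrj : j + 1 - k + t ≤ j := by omega
        have hcast : ((j + 1 - k : Nat) : Int) + (t : Int) = ((j + 1 - k + t : Nat) : Int) := by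
          push_cast; ring
        rw [if_pos (by omega)]
        rw [hcast]
        rw [PySem.List.pyGetD_natCast, PySem.List.getD_map_range _ _ _ _ hrm]
        have hcast2 : (j : Int) - ((j + 1 - k + t : Nat) : Int) =
            ((j - (j + 1 - k + t) : Nat) : Int) := by omega
        rw [hcast2, PySem.List.pyGetD_natCast,
          pv_getD_take_drop p ((j + 1 - k + t) * k) k (j - (j + 1 - k + t)) 'X' (by omega)])]
    rw [PySem.List.foldl_append_singleton_eq_map
      (fun t => p.getD ((j + 1 - k + t) * k + (j - (j + 1 - k + t))) 'X')]
    rw [List.range'_eq_map_range, List.map_map]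
    rfl
  rw [PySem.List.foldl_congr_mem _ _
    (fun res j => res ++ (List.range' (j + 1 - k) (min (j + 1) m - (j + 1 - k))).map
      (fun r => p.getD (r * k + (j - r)) 'X')) []
    (by intro acc j _; exact hstep acc j)]
  rw [PySem.List.foldl_append_eq_flatMap, List.nil_append]
  rfl

lemma pv_enum_fold {β : Type} (g : β → Int → Char → β) : ∀ (l : List Char) (s : Int) (bs : β),
    (l.foldl (fun st ch => (st.1 + 1, g st.2 st.1 ch)) (s, bs)).2 =
      (PySem.List.enumerate l s).foldl (fun b q => g b q.1 q.2) bs := by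
  intro l
  induction l with
  | nil => intro s bs; rfl
  | cons x t ih =>
    intro s bs
    rw [List.foldl_cons, PySem.List.enumerate_cons, List.foldl_cons]
    exact ih (s + 1) (g bs s x)

lemma pv_B_norm (m k : Nat) (hm : 0 < m) (hk : 0 < k) (p : List Char) (hp : p.length = m * k) :
    pvBcore m k p = diagSpec m k p := by
  unfold pvBcore
  rw [pv_enum_fold (fun b i ch =>
    PySem.List.pySetD b (PySem.Int.floordiv i (k : Int) + PySem.Int.mod i (k : Int))
      (PySem.List.pyGetD b (PySem.Int.floordiv i (k : Int) + PySem.Int.mod i (k : Int)) [] ++ [ch]))]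
  have hb0 : (PySem.List.pyRange 0 ((m : Int) + (k : Int) - 1) 1).map (fun _ => ([] : List Char)) =
      List.replicate (m + k - 1) ([] : List Char) := by
    rw [List.map_const', PySem.List.length_pyRange_one]
    congr 1
    omega
  have hlen : PySem.List.len p = ((m * k : Nat) : Int) := by
    simp [PySem.List.len, hp]
  rw [hb0, PySem.List.enumerate_eq_map_pyRange p 'X', hlen, PySem.List.pyRange_zero_nat,
    List.foldl_map, List.foldl_map]
  simp only [PySem.Int.floordiv_natCast, PySem.Int.mod_natCast, ← Nat.cast_add,
    PySem.List.pySetD_natCast, PySem.List.pyGetD_natCast]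
  rw [PySem.List.foldl_append_eq_flatten, List.nil_append, pv_flatten_eq,
    pv_scatter_len (fun i => i / k + i % k) (fun i => p.getD i 'X') (List.range (m * k))
      (List.replicate (m + k - 1) []), List.length_replicate]
  have hbkt : ∀ j : Nat, (List.foldl
      (fun x y => x.set (y / k + y % k) (x.getD (y / k + y % k) [] ++ [p.getD y 'X']))
      (List.replicate (m + k - 1) []) (List.range (m * k))).getD j [] =
      ((List.range (m * k)).filter (fun i => decide (i / k + i % k = j))).map
        (fun i => p.getD i 'X') := by
    intro j
    rw [pv_scatter (fun i => i / k + i % k) (fun i => p.getD i 'X') (List.range (m * k))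
      (List.replicate (m + k - 1) [])
      (by
        intro i hi
        rw [List.length_replicate]
        have h1 : i < m * k := List.mem_range.mp hi
        have h2 : i / k < m := (Nat.div_lt_iff_lt_mul hk).mpr (by omega)
        have h3 : i % k < k := Nat.mod_lt _ hk
        show i / k + i % k < m + k - 1
        omega) j]
    simp
  simp only [hbkt]
  have hrow : ∀ j r : Nat, (((List.range k).map (fun c => r * k + c)).filter
        (fun i => decide (i / k + i % k = j))).map (fun i => p.getD i 'X') =
      (if j + 1 - k ≤ r ∧ r < j + 1 then [p.getD (r * k + (j - r)) 'X'] else []) := by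
    intro j r
    rw [List.filter_map, List.map_map]
    have hpred : ∀ c ∈ List.range k,
        ((fun i => decide (i / k + i % k = j)) ∘ (fun c => r * k + c)) c = decide (r + c = j) := by
      intro c hc
      have hck : c < k := List.mem_range.mp hc
      have h1 : (r * k + c) / k = r := by
        rw [Nat.mul_comm, Nat.mul_add_div hk, Nat.div_eq_of_lt hck, Nat.add_zero]
      have h2 : (r * k + c) % k = c := by
        rw [Nat.mul_comm r k, Nat.mul_add_mod, Nat.mod_eq_of_lt hck]
      simp [h1, h2]
    rw [List.filter_congr hpred, pv_filter_range_eq k r j]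
    by_cases hcond : r ≤ j ∧ j < r + k
    · rw [if_pos hcond, if_pos (by omega)]
      simp
    · rw [if_neg hcond, if_neg (by omega)]
      rfl
  have hj : ∀ j : Nat, ((List.range (m * k)).filter (fun i => decide (i / k + i % k = j))).map
        (fun i => p.getD i 'X') =
      (List.range' (j + 1 - k) (min (j + 1) m - (j + 1 - k))).map
        (fun r => p.getD (r * k + (j - r)) 'X') := by
    intro j
    rw [pv_range_mul k m, List.filter_flatMap, List.map_flatMap]
    simp only [hrow j]
    exact pv_flatMap_range_if _ _ _ m
  simp only [hj]
  rfl

lemma pv_res_degenerate (nrows ncols : Int) (h : nrows ≤ 0 ∨ ncols ≤ 0)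
    (grid : List (List Char)) : pvAres nrows ncols grid = [] := by
  unfold pvAres
  rcases h with h | h
  · rw [PySem.List.foldl_congr_mem _ _ (fun res _ => res) []
      (by
        intro acc d _
        rw [PySem.List.pyRange_one_eq_nil (by omega)]
        rfl),
      PySem.List.foldl_ignore]
  · rw [PySem.List.foldl_congr_mem _ _ (fun res _ => res) []
      (by
        intro acc d _
        rw [PySem.List.foldl_congr_mem _ _ (fun res _ => res) acc
          (by intro acc2 r _; rw [if_neg (by omega)]),
          PySem.List.foldl_ignore]),
      PySem.List.foldl_ignore]

lemma pv_A_degenerate (ct : String) (nrows ncols : Int) (h : nrows ≤ 0 ∨ ncols ≤ 0) :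
    route_cipher_diagonal ct nrows ncols = "" := by
  have h0 : route_cipher_diagonal ct nrows ncols =
      String.ofList (PySem.List.slice
        (pvAres nrows ncols (pvAgrid nrows ncols (pvPadI ct.toList (nrows * ncols)))) none
        (some (ct.toList.length : Int))) := rfl
  rw [h0, pv_res_degenerate nrows ncols h, PySem.List.slice_to _ (by positivity)]
  simp

theorem route_cipher_diagonal_spec : Claim_equal_route_cipher_diagonal := by
  intro ct nrows ncols _
  show route_cipher_diagonal ct nrows ncols = route_cipher_diagonal_alt ct nrows ncols
  by_cases hdeg : nrows ≤ 0 ∨ ncols ≤ 0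
  · rw [pv_A_degenerate ct nrows ncols hdeg]
    unfold route_cipher_diagonal_alt
    rw [if_pos hdeg]
  · push Not at hdeg
    obtain ⟨m, rfl⟩ := Int.eq_ofNat_of_zero_le hdeg.1.le
    obtain ⟨k, rfl⟩ := Int.eq_ofNat_of_zero_le hdeg.2.le
    have hm : 0 < m := by exact_mod_cast hdeg.1
    have hk : 0 < k := by exact_mod_cast hdeg.2
    have hp := pv_padded_len ct.toList m k
    calc route_cipher_diagonal ct (m : Int) (k : Int)
        = String.ofList (PySem.List.slice (pvAres (m : Int) (k : Int) (pvAgrid (m : Int) (k : Int) (pvPadI ct.toList ((m : Int) * (k : Int))))) none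
            (some (ct.toList.length : Int))) := rfl
      _ = String.ofList (PySem.List.slice (pvBcore m k (pvPadI ct.toList ((m : Int) * (k : Int)))) none
            (some (ct.toList.length : Int))) := by
            rw [pv_A_norm m k hm hk _ hp, pv_B_norm m k hm hk _ hp]
      _ = route_cipher_diagonal_alt ct (m : Int) (k : Int) := by
            unfold route_cipher_diagonal_alt
            rw [if_neg (by push Not; exact hdeg)]
            rfl
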